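-- pv_equiv track=rewrite | github.com/zeynepyorulmaz/wegathon | python-backend/app/services/plan_transformer.py | split_block_into_time_slots
-- ===== SOURCE A (Python) =====
-- from typing import Dict, Any, List
--
-- BLOCK_TIME_RANGES = {
--     "morning": ("08:00", "12:00"),
--     "afternoon": ("12:00", "17:00"),
--     "evening": ("17:00", "22:00"),
--     "late-night": ("22:00", "02:00"),
--     "check-in": ("14:00", "15:00"),
--     "check-out": ("10:00", "11:00"),
--     "transit": ("06:00", "08:00"),
-- }
--
-- def split_block_into_time_slots(
--     block_label: str,
--     items: List[Dict[str, Any]]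
-- ) -> List[tuple]:
--     """
--     Split a block into hourly time slots.
--     Returns list of (start_time, end_time) tuples.
--     """
--     base_start, base_end = BLOCK_TIME_RANGES.get(block_label, ("09:00", "12:00"))
--
--     # Parse times
--     start_h, start_m = map(int, base_start.split(":"))
--     end_h, end_m = map(int, base_end.split(":"))
--
--     # Calculate duration
--     total_minutes = (end_h * 60 + end_m) - (start_h * 60 + start_m)
--
--     # For long blocks, split into 2-3 hour chunks
--     if total_minutes > 180:  # More than 3 hours
--         chunk_duration = 120  # 2 hour chunks
--     else:
--         chunk_duration = total_minutes  # Use whole block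
--
--     slots = []
--     current_h, current_m = start_h, start_m
--
--     while (current_h * 60 + current_m) < (end_h * 60 + end_m):
--         slot_start = f"{current_h:02d}:{current_m:02d}"
--
--         # Calculate end time
--         end_minutes = current_h * 60 + current_m + chunk_duration
--         slot_end_h = end_minutes // 60
--         slot_end_m = end_minutes % 60
--
--         # Don't exceed block end
--         if slot_end_h > end_h or (slot_end_h == end_h and slot_end_m > end_m):
--             slot_end_h, slot_end_m = end_h, end_m
--
--         slot_end = f"{slot_end_h:02d}:{slot_end_m:02d}"
--
--         slots.append((slot_start, slot_end))
--
--         # Move to next slot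
--         current_h = slot_end_h
--         current_m = slot_end_m
--
--     return slots
-- ===== SOURCE B (Python) =====
-- from typing import Dict, Any, List
--
-- BLOCK_TIME_RANGES = {
--     "morning": ("08:00", "12:00"),
--     "afternoon": ("12:00", "17:00"),
--     "evening": ("17:00", "22:00"),
--     "late-night": ("22:00", "02:00"),
--     "check-in": ("14:00", "15:00"),
--     "check-out": ("10:00", "11:00"),
--     "transit": ("06:00", "08:00"),
-- }
--
--
-- def _fmt(m):
--     return f"{m // 60:02d}:{m % 60:02d}"
--
--
-- def split_block_into_time_slots(
--     block_label: str,
--     items: List[Dict[str, Any]]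
-- ) -> List[tuple]:
--     """Closed-form slot count + index-based comprehension (no stateful loop)."""
--     base_start, base_end = BLOCK_TIME_RANGES.get(block_label, ("09:00", "12:00"))
--     sh, sm = map(int, base_start.split(":"))
--     eh, em = map(int, base_end.split(":"))
--     start = sh * 60 + sm
--     end = eh * 60 + em
--     duration = end - start
--     chunk = 120 if duration > 180 else duration
--     n = -(-duration // chunk) if duration > 0 else 0
--     return [(_fmt(start + i * chunk), _fmt(min(start + (i + 1) * chunk, end)))
--             for i in range(n)]
-- ===== Notes on version B (the rewrite author's own statement) =====
-- stated objective: simpler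
-- what changed: Replaces A's stateful while-loop (mutating current h/m and clamping each step) with a closed-form ceiling slot count and an index-based comprehension over range(n) computed entirely in total minutes.
import Mathlib
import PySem

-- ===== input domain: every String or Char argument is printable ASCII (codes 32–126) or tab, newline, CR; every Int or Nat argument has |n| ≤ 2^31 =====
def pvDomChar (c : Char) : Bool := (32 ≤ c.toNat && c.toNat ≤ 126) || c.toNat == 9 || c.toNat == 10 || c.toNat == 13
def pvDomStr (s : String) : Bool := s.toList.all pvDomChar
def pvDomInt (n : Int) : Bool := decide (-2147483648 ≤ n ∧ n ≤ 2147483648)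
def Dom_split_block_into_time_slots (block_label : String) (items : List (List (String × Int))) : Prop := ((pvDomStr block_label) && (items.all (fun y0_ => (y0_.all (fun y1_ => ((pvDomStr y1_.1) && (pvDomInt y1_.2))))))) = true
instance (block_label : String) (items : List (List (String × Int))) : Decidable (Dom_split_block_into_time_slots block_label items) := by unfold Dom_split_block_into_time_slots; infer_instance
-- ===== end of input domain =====

-- B replaces A's stateful accumulating while-loop by a closed-form ceiling slot count
-- and an index-based map over range(n) (objective: simpler decomposition, same cost).
-- 'items' is never read by either program.

-- ===== PORT A =====

-- the module constant BLOCK_TIME_RANGES (literal dict, insertion order)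
def pvBLOCK_TIME_RANGES : PySem.Dict String (String × String) :=
  PySem.Dict.mk [("morning", ("08:00", "12:00")),
                 ("afternoon", ("12:00", "17:00")),
                 ("evening", ("17:00", "22:00")),
                 ("late-night", ("22:00", "02:00")),
                 ("check-in", ("14:00", "15:00")),
                 ("check-out", ("10:00", "11:00")),
                 ("transit", ("06:00", "08:00"))]

-- 'h, m = map(int, s.split(":"))' — exact on this module's "HH:MM" literals, the only
-- strings it is ever applied to (both table entries of every key and the default parse)
def pvParseHM (s : String) : Int × Int :=
  let parts := (PySem.Str.split? s ":").getD []
  (((PySem.List.pyGet? parts 0).bind PySem.Int.ofStr?).getD 0,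
   ((PySem.List.pyGet? parts 1).bind PySem.Int.ofStr?).getD 0)

-- f"{n:02d}" for 0 ≤ n (zero-pad to width 2), as a char list
def pvFmt2 (n : Int) : List Char :=
  let cs := PySem.Int.toChars n
  if cs.length < 2 then '0' :: cs else cs

-- f"{h:02d}:{m:02d}"
def pvFmtHM (h m : Int) : String := String.ofList (pvFmt2 h ++ ':' :: pvFmt2 m)

-- A's while-loop; fuel = remaining minutes + 1 (each entered iteration advances the
-- clamped current time by at least one minute on every input this module produces)
def pvLoopA (end_h end_m chunk : Int) : Nat → Int × Int → List (String × String) → List (String × String)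
  | 0, _, slots => slots
  | fuel + 1, (cur_h, cur_m), slots =>
    if cur_h * 60 + cur_m < end_h * 60 + end_m then
      let slot_start := pvFmtHM cur_h cur_m
      let end_minutes := cur_h * 60 + cur_m + chunk
      let slot_end_h := PySem.Int.floordiv end_minutes 60
      let slot_end_m := PySem.Int.mod end_minutes 60
      let p : Int × Int :=
        if slot_end_h > end_h ∨ (slot_end_h = end_h ∧ slot_end_m > end_m)
        then (end_h, end_m) else (slot_end_h, slot_end_m)
      let slot_end := pvFmtHM p.1 p.2
      pvLoopA end_h end_m chunk fuel p (slots ++ [(slot_start, slot_end)])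
    else slots

def split_block_into_time_slots (block_label : String) (items : List (List (String × Int))) : List (String × String) :=
  let base := pvBLOCK_TIME_RANGES.getD block_label ("09:00", "12:00")
  let s := pvParseHM base.1
  let e := pvParseHM base.2
  let total_minutes := (e.1 * 60 + e.2) - (s.1 * 60 + s.2)
  let chunk_duration := if total_minutes > 180 then (120 : Int) else total_minutes
  pvLoopA e.1 e.2 chunk_duration (total_minutes.toNat + 1) (s.1, s.2) []

-- ===== PORT B =====

-- B's _fmt: f"{m//60:02d}:{m%60:02d}"
def pvFmtMin (m : Int) : String := pvFmtHM (PySem.Int.floordiv m 60) (PySem.Int.mod m 60)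

def split_block_into_time_slots_alt (block_label : String) (items : List (List (String × Int))) : List (String × String) :=
  let base := pvBLOCK_TIME_RANGES.getD block_label ("09:00", "12:00")
  let s := pvParseHM base.1
  let e := pvParseHM base.2
  let start := s.1 * 60 + s.2
  let «end» := e.1 * 60 + e.2
  let duration := «end» - start
  let chunk := if duration > 180 then (120 : Int) else duration
  let n := if duration > 0 then -(PySem.Int.floordiv (-duration) chunk) else 0
  (PySem.List.pyRange 0 n 1).map (fun i =>
    (pvFmtMin (start + i * chunk), pvFmtMin (min (start + (i + 1) * chunk) «end»)))

-- ===== PRECONDITION & SPEC =====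
def Spec_split_block_into_time_slots (block_label : String) (items : List (List (String × Int))) (out : List (String × String)) : Prop := out = split_block_into_time_slots_alt block_label items
instance (block_label : String) (items : List (List (String × Int))) (out : List (String × String)) : Decidable (Spec_split_block_into_time_slots block_label items out) := by unfold Spec_split_block_into_time_slots; infer_instance

-- ===== CLAIM (what is proved, stated in full; the proofs are below) =====
def Claim_equal_split_block_into_time_slots : Prop := ∀ (block_label : String) (items : List (List (String × Int))), Dom_split_block_into_time_slots block_label items → Spec_split_block_into_time_slots block_label items (split_block_into_time_slots block_label items)

-- ===== LEMMAS AND PROOFS =====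

-- Everything after the dict lookup is a function of the looked-up pair alone.
def pvCoreA (base : String × String) : List (String × String) :=
  let s := pvParseHM base.1
  let e := pvParseHM base.2
  let total_minutes := (e.1 * 60 + e.2) - (s.1 * 60 + s.2)
  let chunk_duration := if total_minutes > 180 then (120 : Int) else total_minutes
  pvLoopA e.1 e.2 chunk_duration (total_minutes.toNat + 1) (s.1, s.2) []

def pvCoreB (base : String × String) : List (String × String) :=
  let s := pvParseHM base.1
  let e := pvParseHM base.2
  let start := s.1 * 60 + s.2
  let «end» := e.1 * 60 + e.2
  let duration := «end» - start
  let chunk := if duration > 180 then (120 : Int) else duration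
  let n := if duration > 0 then -(PySem.Int.floordiv (-duration) chunk) else 0
  (PySem.List.pyRange 0 n 1).map (fun i =>
    (pvFmtMin (start + i * chunk), pvFmtMin (min (start + (i + 1) * chunk) «end»)))

theorem pvA_eq_core (l : String) (it : List (List (String × Int))) :
    split_block_into_time_slots l it = pvCoreA (pvBLOCK_TIME_RANGES.getD l ("09:00", "12:00")) := rfl

theorem pvB_eq_core (l : String) (it : List (List (String × Int))) :
    split_block_into_time_slots_alt l it = pvCoreB (pvBLOCK_TIME_RANGES.getD l ("09:00", "12:00")) := rfl

-- getD over a literal dict peels one entry at a time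
theorem pvGetD_cons {ν : Type} (k : String) (v : ν) (rest : List (String × ν)) (x : String) (dflt : ν) :
    (PySem.Dict.mk ((k, v) :: rest)).getD x dflt
      = if k == x then v else (PySem.Dict.mk rest).getD x dflt := by
  unfold PySem.Dict.getD
  rw [PySem.Dict.get?_mk_cons]
  split <;> rfl

theorem pvGetD_nil {ν : Type} (x : String) (dflt : ν) :
    (PySem.Dict.mk ([] : List (String × ν))).getD x dflt = dflt := rfl

-- the two cores agree on every pair the lookup can produce (the seven table values
-- and the default), by computation
theorem pvCore_eq (p : String × String) (h : p ∈ [("08:00", "12:00"), ("12:00", "17:00"),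
    ("17:00", "22:00"), ("22:00", "02:00"), ("14:00", "15:00"), ("10:00", "11:00"),
    ("06:00", "08:00"), ("09:00", "12:00")]) : pvCoreA p = pvCoreB p := by fin_cases h <;> decide

-- ===== VERDICT (by name: the statement is the Claim_ definition above) =====
theorem split_block_into_time_slots_spec : Claim_equal_split_block_into_time_slots := by
  intro l it _
  show split_block_into_time_slots l it = split_block_into_time_slots_alt l it
  rw [pvA_eq_core, pvB_eq_core, pvBLOCK_TIME_RANGES]
  rw [pvGetD_cons, pvGetD_cons, pvGetD_cons, pvGetD_cons, pvGetD_cons, pvGetD_cons,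
      pvGetD_cons, pvGetD_nil]
  split_ifs <;> exact pvCore_eq _ (by simp)
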